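-- pv_equiv track=rewrite | github.com/choiyh0630/RosalindChallenge | k-Mer_Composition.py | get_4mer_composition
-- ===== SOURCE A (Python) =====
-- def get_4mer_composition(dna):
--     fmer_composition = [0 for i in range(256)]
--     nuc_dic = {"A": 0, "C": 1, "G": 2, "T": 3}
--     def get_4mer_index(fmer, nuc_mapping):
--         index = 0
--         quat_rep = {0: 4**3, 1: 4**2, 2: 4**1, 3: 4**0}
--         for n in range(len(fmer)):
--             index += quat_rep[n] * nuc_mapping[fmer[n]]
--         return index
--
--     for m in range(len(dna[:-3])):
--         current_fmer = dna[m:m+4]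
--         fmer_pos = get_4mer_index(current_fmer, nuc_dic)
--         fmer_composition[fmer_pos] += 1
--
--     return fmer_composition
-- ===== SOURCE B (Python) =====
-- def get_4mer_composition(dna):
--     counts = [0] * 256
--     if len(dna) < 4:
--         return counts
--     dig = {"A": 0, "C": 1, "G": 2, "T": 3}
--     idx = 0
--     for ch in dna[:4]:
--         idx = idx * 4 + dig[ch]
--     counts[idx] += 1
--     for ch in dna[4:]:
--         idx = (idx % 64) * 4 + dig[ch]
--         counts[idx] += 1
--     return counts
-- ===== Notes on version B (the rewrite author's own statement) =====
-- stated objective: faster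
-- what changed: A recomputes each window's base-4 index from scratch with an inner positional loop over every 4-mer slice; B makes a single pass keeping one rolling index updated as (idx % 64)*4 + digit, incrementing the 256-slot table directly.
-- outside the precondition, e.g. on get_4mer_composition('ACGX'): A raises KeyError, B raises KeyError
import Mathlib
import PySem

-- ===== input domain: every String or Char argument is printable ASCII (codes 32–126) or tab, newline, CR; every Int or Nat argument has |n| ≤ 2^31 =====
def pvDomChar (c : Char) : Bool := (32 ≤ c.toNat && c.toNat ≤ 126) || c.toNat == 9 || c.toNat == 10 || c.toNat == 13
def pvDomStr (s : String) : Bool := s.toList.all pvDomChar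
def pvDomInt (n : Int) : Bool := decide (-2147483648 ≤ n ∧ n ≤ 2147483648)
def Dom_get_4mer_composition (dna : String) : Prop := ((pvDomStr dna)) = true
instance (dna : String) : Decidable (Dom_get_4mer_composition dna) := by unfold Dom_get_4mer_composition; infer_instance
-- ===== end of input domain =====

-- B replaces A's per-window base-4 index recomputation (inner loop per window) by a single pass with a rolling index.

-- ===== PORT A =====
-- nuc_dic = {"A": 0, "C": 1, "G": 2, "T": 3}
def pvNuc : PySem.Dict Char Int := PySem.Dict.ofList [('A', 0), ('C', 1), ('G', 2), ('T', 3)]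
-- quat_rep = {0: 4**3, 1: 4**2, 2: 4**1, 3: 4**0}
def pvQuat : PySem.Dict Int Int := PySem.Dict.ofList [(0, 64), (1, 16), (2, 4), (3, 1)]
-- fmer_composition[fmer_pos] += 1  (the index is in range under Pre_, where getD/pySetD are exact)
def pvBump (cnt : List Int) (i : Int) : List Int :=
  PySem.List.pySetD cnt i (PySem.List.pyGetD cnt i 0 + 1)
-- get_4mer_index(fmer, nuc_dic): nuc_mapping[fmer[n]] raises KeyError on a non-ACGT char; getD 0 is exact under Pre_
def pvIdxA (fmer : List Char) : Int :=
  (PySem.List.pyRange 0 (fmer.length : Int) 1).foldl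
    (fun index n => index + pvQuat.getD n 0 * pvNuc.getD (PySem.List.pyGetD fmer n ' ') 0) 0

def get_4mer_composition (dna : String) : List Int :=
  (PySem.List.pyRange 0 ((PySem.List.slice dna.toList none (some (-3))).length : Int) 1).foldl
    (fun comp m => pvBump comp (pvIdxA (PySem.List.slice dna.toList (some m) (some (m + 4)))))
    ((PySem.List.pyRange 0 256 1).map (fun _ => (0 : Int)))

-- ===== PORT B =====
-- dig = {"A": 0, "C": 1, "G": 2, "T": 3}  (dig[ch] raises KeyError on non-ACGT chars; getD 0 is exact under Pre_)
def pvDig : PySem.Dict Char Int := PySem.Dict.ofList [('A', 0), ('C', 1), ('G', 2), ('T', 3)]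

def get_4mer_composition_alt (dna : String) : List Int :=
  let counts : List Int := List.replicate 256 0
  if dna.toList.length < 4 then counts
  else
    let idx0 := (dna.toList.take 4).foldl (fun idx c => idx * 4 + pvDig.getD c 0) 0
    let counts1 := pvBump counts idx0
    ((dna.toList.drop 4).foldl
      (fun (p : List Int × Int) c =>
        let i := (PySem.Int.mod p.2 64) * 4 + pvDig.getD c 0
        (pvBump p.1 i, i))
      (counts1, idx0)).1

-- ===== PRECONDITION & SPEC =====
-- Pre_ excludes strings of length ≥ 4 containing a non-ACGT character: on those A raises KeyError (and so does B).
def Pre_get_4mer_composition (dna : String) : Prop :=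
  dna.toList.length < 4 ∨
    dna.toList.all (fun c => c == 'A' || c == 'C' || c == 'G' || c == 'T') = true
instance (dna : String) : Decidable (Pre_get_4mer_composition dna) := by
  unfold Pre_get_4mer_composition; infer_instance
def pvWitness_get_4mer_composition : String := "ACGTAC"

def Spec_get_4mer_composition (dna : String) (out : List Int) : Prop := out = get_4mer_composition_alt dna
instance (dna : String) (out : List Int) : Decidable (Spec_get_4mer_composition dna out) := by unfold Spec_get_4mer_composition; infer_instance

-- ===== CLAIM (what is proved, stated in full; the proofs are below) =====
def Claim_equal_get_4mer_composition : Prop := ∀ (dna : String), Dom_get_4mer_composition dna → Pre_get_4mer_composition dna → Spec_get_4mer_composition dna (get_4mer_composition dna)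

-- ===== LEMMAS AND PROOFS =====

-- digit of one nucleotide
def pvD (c : Char) : Int := pvNuc.getD c 0
-- base-4 index of one 4-character window
def pvW (a b c e : Char) : Int := 64 * pvD a + 16 * pvD b + 4 * pvD c + pvD e
-- the window indices of a string, sliding left to right
def pvIdxList : List Char → List Int
  | a :: b :: c :: e :: rest => pvW a b c e :: pvIdxList (b :: c :: e :: rest)
  | _ => []

theorem pvD_bounds {c : Char} (h : c = 'A' ∨ c = 'C' ∨ c = 'G' ∨ c = 'T') :
    0 ≤ pvD c ∧ pvD c < 4 := by
  rcases h with h | h | h | h <;> subst h <;> decide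

theorem pvIdxA_window (a b c e : Char) : pvIdxA [a, b, c, e] = pvW a b c e := by
  have h4 : PySem.List.pyRange 0 4 1 = [0, 1, 2, 3] := by decide
  have q0 : pvQuat.getD 0 0 = 64 := by decide
  have q1 : pvQuat.getD 1 0 = 16 := by decide
  have q2 : pvQuat.getD 2 0 = 4 := by decide
  have q3 : pvQuat.getD 3 0 = 1 := by decide
  simp only [pvIdxA, List.length_cons, List.length_nil]
  norm_num [h4, q0, q1, q2, q3, pvW, pvD, PySem.List.pyGetD,
    show Int.toNat 2 = 2 from rfl, show Int.toNat 3 = 3 from rfl]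

theorem pvIdxList_short {xs : List Char} (h : xs.length < 4) : pvIdxList xs = [] := by
  rcases xs with _ | ⟨a, _ | ⟨b, _ | ⟨c, _ | ⟨e, rest⟩⟩⟩⟩
  · simp [pvIdxList]
  · simp [pvIdxList]
  · simp [pvIdxList]
  · simp [pvIdxList]
  · simp at h; omega

theorem foldA (xs : List Char) (init : List Int) :
    (List.range (xs.length - 3)).foldl
      (fun comp k => pvBump comp (pvIdxA ((xs.drop k).take 4))) init
    = (pvIdxList xs).foldl pvBump init := by
  induction xs using pvIdxList.induct generalizing init with
  | case1 a b c e rest ih =>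
      have hlen : (a :: b :: c :: e :: rest).length - 3 = rest.length + 1 := by simp
      have hlen' : (b :: c :: e :: rest).length - 3 = rest.length := by simp
      rw [hlen'] at ih
      rw [hlen, List.range_succ_eq_map, List.foldl_cons, List.foldl_map]
      simp only [List.drop_zero, List.take_succ_cons, List.take_zero]
      rw [pvIdxA_window]
      have hsh : ∀ (comp : List Int) (k : Nat),
          pvBump comp (pvIdxA (((a :: b :: c :: e :: rest).drop (k + 1)).take 4))
          = pvBump comp (pvIdxA (((b :: c :: e :: rest).drop k).take 4)) := by
        intro comp k; rfl
      simp only [Nat.succ_eq_add_one, hsh]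
      rw [ih]
      simp [pvIdxList]
  | case2 xs h =>
      have h0 : xs.length - 3 = 0 := by
        rcases xs with _ | ⟨a, _ | ⟨b, _ | ⟨c, _ | ⟨e, rest⟩⟩⟩⟩
        · simp
        · simp
        · simp
        · simp
        · exact absurd rfl (h a b c e rest)
      have h1 : pvIdxList xs = [] := by
        rcases xs with _ | ⟨a, _ | ⟨b, _ | ⟨c, _ | ⟨e, rest⟩⟩⟩⟩
        · simp [pvIdxList]
        · simp [pvIdxList]
        · simp [pvIdxList]
        · simp [pvIdxList]
        · exact absurd rfl (h a b c e rest)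
      rw [h0, h1]
      simp

theorem roll (cs : List Char) (cnt : List Int) (a b c e : Char)
    (hb : b = 'A' ∨ b = 'C' ∨ b = 'G' ∨ b = 'T')
    (hc : c = 'A' ∨ c = 'C' ∨ c = 'G' ∨ c = 'T')
    (he : e = 'A' ∨ e = 'C' ∨ e = 'G' ∨ e = 'T')
    (hcs : ∀ x ∈ cs, x = 'A' ∨ x = 'C' ∨ x = 'G' ∨ x = 'T') :
    (cs.foldl
      (fun (p : List Int × Int) x =>
        let i := (PySem.Int.mod p.2 64) * 4 + pvDig.getD x 0
        (pvBump p.1 i, i))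
      (cnt, pvW a b c e)).1
    = (pvIdxList (b :: c :: e :: cs)).foldl pvBump cnt := by
  induction cs generalizing cnt a b c e with
  | nil => simp [pvIdxList]
  | cons x cs ih =>
      have hx : x = 'A' ∨ x = 'C' ∨ x = 'G' ∨ x = 'T' := hcs x (by simp)
      have hstep : (PySem.Int.mod (pvW a b c e) 64) * 4 + pvDig.getD x 0 = pvW b c e x := by
        have hdig : pvDig.getD x 0 = pvD x := rfl
        have h1 := pvD_bounds hb
        have h2 := pvD_bounds hc
        have h3 := pvD_bounds he
        have h4 := pvD_bounds hx
        rw [PySem.Int.mod_eq_emod_of_pos (by norm_num), hdig]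
        unfold pvW
        omega
      rw [List.foldl_cons]
      simp only [hstep]
      rw [ih (pvBump cnt (pvW b c e x)) b c e x hc he hx (fun y hy => hcs y (by simp [hy]))]
      simp [pvIdxList]

theorem zeros_eq : (PySem.List.pyRange 0 256 1).map (fun _ => (0:Int)) = List.replicate 256 0 := by
  rw [PySem.List.pyRange_one, List.map_map]
  simp only [Function.comp_def]
  rw [List.map_const', List.length_range]
  simp

theorem sliceWin (l : List Char) (k : Nat) :
    PySem.List.slice l (some (k:Int)) (some ((k:Int)+4)) = (l.drop k).take 4 := by
  have h := PySem.List.slice_natCast_add (xs := l) (j := k) (n := 4)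
  push_cast at h
  exact h

theorem sliceNeg3 (l : List Char) :
    (PySem.List.slice l none (some (-3))).length = l.length - 3 := by
  rw [PySem.List.slice_to_neg_ofNat l 3 (by norm_num)]
  simp

theorem Aside (dna : String) :
    get_4mer_composition dna
    = (pvIdxList dna.toList).foldl pvBump (List.replicate 256 0) := by
  unfold get_4mer_composition
  rw [zeros_eq, sliceNeg3, PySem.List.pyRange_one, List.foldl_map]
  have hbody : ∀ (comp : List Int) (k : Nat),
      pvBump comp (pvIdxA (PySem.List.slice dna.toList (some ((0:Int) + ↑k)) (some ((0:Int) + ↑k + 4))))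
      = pvBump comp (pvIdxA ((dna.toList.drop k).take 4)) := by
    intro comp k
    rw [show (0:Int) + (k:Int) = (k:Int) by ring, sliceWin]
  simp only [hbody]
  rw [show (((dna.toList.length - 3 : Nat) : Int) - 0).toNat = dna.toList.length - 3 by simp]
  exact foldA dna.toList _

theorem Bside (dna : String) (hpre : Pre_get_4mer_composition dna) :
    get_4mer_composition_alt dna
    = (pvIdxList dna.toList).foldl pvBump (List.replicate 256 0) := by
  unfold get_4mer_composition_alt
  by_cases h4 : dna.toList.length < 4
  · rw [if_pos h4, pvIdxList_short h4, List.foldl_nil]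
  · rw [if_neg h4]
    have hall : ∀ c ∈ dna.toList, c = 'A' ∨ c = 'C' ∨ c = 'G' ∨ c = 'T' := by
      rcases hpre with h | h
      · exact absurd h h4
      · intro x hx
        have := List.all_eq_true.mp h x hx
        simp only [Bool.or_eq_true, beq_iff_eq] at this
        tauto
    obtain ⟨a, b, c, e, rest, hl⟩ :
        ∃ a b c e rest, dna.toList = a :: b :: c :: e :: rest := by
      rcases h : dna.toList with _ | ⟨a, _ | ⟨b, _ | ⟨c, _ | ⟨e, rest⟩⟩⟩⟩ <;>
        first
          | exact ⟨a, b, c, e, rest, rfl⟩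
          | (exfalso; apply h4; rw [h]; simp)
    rw [hl] at hall ⊢
    have hidx0 : ((a :: b :: c :: e :: rest).take 4).foldl
        (fun idx c => idx * 4 + pvDig.getD c 0) 0 = pvW a b c e := by
      simp only [List.take_succ_cons, List.take_zero, List.foldl_cons, List.foldl_nil]
      show (((0 * 4 + pvD a) * 4 + pvD b) * 4 + pvD c) * 4 + pvD e = pvW a b c e
      unfold pvW
      ring
    rw [hidx0]
    have hdrop : (a :: b :: c :: e :: rest).drop 4 = rest := rfl
    rw [hdrop,
        roll rest (pvBump (List.replicate 256 0) (pvW a b c e)) a b c e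
          (hall b (by simp)) (hall c (by simp)) (hall e (by simp))
          (fun y hy => hall y (by simp [hy]))]
    rw [show pvIdxList (a :: b :: c :: e :: rest)
          = pvW a b c e :: pvIdxList (b :: c :: e :: rest) from rfl,
        List.foldl_cons]

-- ===== VERDICT (by name: the statement is the Claim_ definition above) =====
theorem get_4mer_composition_spec : Claim_equal_get_4mer_composition := by
  intro dna _ hpre
  show get_4mer_composition dna = get_4mer_composition_alt dna
  rw [Aside dna, Bside dna hpre]
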